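-- pv_equiv track=rewrite | github.com/STkangyh/Algorithm_Practice | 4/파이썬 기본코드/3. 좌석번호.py | solution
-- ===== SOURCE A (Python) =====
-- def solution(c, r, k):
--     if k>c*r:
--         return [0,0]
--     answer = []
--     dx = [-1, 0, 1, 0]
--     dy = [0, 1, 0, -1]
--     dir = 1
--     x,y = 0,0
--     cnt = 1
--     seats = [[0]*r for _ in range(c)]
--     while cnt<k:
--         nx, ny = x+dx[dir], y+dy[dir]
--         if nx<0 or nx>=c or ny<0 or ny>=r or seats[nx][ny]!=0:
--             dir = (dir+1)%4
--             continue
--         seats[x][y]=cnt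
--         cnt+=1
--         x,y = nx,ny
--
--     return [x+1, y+1]
-- ===== SOURCE B (Python) =====
-- def solution(c, r, k):
--     if k > c * r:
--         return [0, 0]
--     if k < 2:
--         return [1, 1]
--     m = k - 1
--     t, b, l, rr = 0, c - 1, 0, r - 1
--     while t <= b and l <= rr:
--         top = rr - l + 1
--         if m < top:
--             return [t + 1, l + m + 1]
--         m -= top
--         right = b - t
--         if m < right:
--             return [t + m + 2, rr + 1]
--         m -= right
--         bottom = rr - l if t < b else 0
--         if m < bottom:
--             return [b + 1, rr - m]
--         m -= bottom
--         left = b - t - 1 if l < rr else 0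
--         if m < left:
--             return [b - m, l + 1]
--         m -= left
--         t += 1; b -= 1; l += 1; rr -= 1
--     return [0, 0]
-- ===== Notes on version B (the rewrite author's own statement) =====
-- stated objective: faster
-- what changed: B replaces A's cell-by-cell spiral walk over an allocated c-by-r seats matrix with ring peeling: it subtracts closed-form side lengths of each spiral ring from k-1 until the target falls on one of the current ring's four sides, then returns the position by arithmetic.
import Mathlib
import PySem

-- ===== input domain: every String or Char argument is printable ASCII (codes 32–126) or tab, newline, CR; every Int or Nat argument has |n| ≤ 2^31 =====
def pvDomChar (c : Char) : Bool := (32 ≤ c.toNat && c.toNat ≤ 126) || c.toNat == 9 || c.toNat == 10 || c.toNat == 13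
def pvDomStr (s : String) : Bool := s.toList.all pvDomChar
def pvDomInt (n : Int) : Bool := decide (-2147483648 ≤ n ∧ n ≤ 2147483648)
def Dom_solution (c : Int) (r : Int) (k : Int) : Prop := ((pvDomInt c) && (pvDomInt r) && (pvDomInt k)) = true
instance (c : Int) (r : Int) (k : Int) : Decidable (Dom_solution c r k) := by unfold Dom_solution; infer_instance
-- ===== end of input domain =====

-- B peels spiral rings with closed-form side counts instead of A's cell-by-cell walk over a
-- c×r seats matrix (objective: faster — O(min(c,r)) time and O(1) space vs A's O(k) walk on an
-- O(c*r) matrix). Equivalence is about the return value; neither version mutates its arguments.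

-- ===== PORT A =====
-- dx, dy: A's direction tables (locals in the Python, constant helpers here)
def dxA : List Int := [-1, 0, 1, 0]
def dyA : List Int := [0, 1, 0, -1]

-- seats[a][b] read; indices are in range whenever Python evaluates this (guard short-circuit), so getD defaults are unreachable
def seatGet (seats : List (List Int)) (a b : Int) : Int :=
  PySem.List.pyGetD (PySem.List.pyGetD seats a []) b 0

-- seats[a][b] = v; a, b are always in range at write sites (current position)
def seatSet (seats : List (List Int)) (a b : Int) (v : Int) : List (List Int) :=
  PySem.List.pySetD seats a (PySem.List.pySetD (PySem.List.pyGetD seats a []) b v)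

-- A's while loop, fuel-based (the fuel 2*k.toNat+8 is proven sufficient on Pre_; outside Pre_ the
-- Python loop can diverge and nothing is claimed)
def loopA (fuel : Nat) (c r k : Int) (dir x y cnt : Int) (seats : List (List Int)) : List Int :=
  match fuel with
  | 0 => [x + 1, y + 1]
  | f + 1 =>
    if cnt < k then
      let nx := x + PySem.List.pyGetD dxA dir 0
      let ny := y + PySem.List.pyGetD dyA dir 0
      if nx < 0 ∨ c ≤ nx ∨ ny < 0 ∨ r ≤ ny ∨ seatGet seats nx ny ≠ 0 then
        loopA f c r k (PySem.Int.mod (dir + 1) 4) x y cnt seats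
      else
        loopA f c r k dir nx ny (cnt + 1) (seatSet seats x y cnt)
    else [x + 1, y + 1]

def solution (c : Int) (r : Int) (k : Int) : List Int :=
  if c * r < k then [0, 0]
  else loopA (2 * k.toNat + 8) c r k 1 0 0 1
        (List.replicate c.toNat (List.replicate r.toNat 0))

-- ===== PORT B =====
-- one spiral ring per call: window rows [t..bt], cols [l..rt], m = 0-based offset of the target
def solRing (t bt l rt m : Int) : List Int :=
  if _h : t ≤ bt ∧ l ≤ rt then
    let top := rt - l + 1
    if m < top then [t + 1, l + m + 1]
    else
      let m1 := m - top
      let right := bt - t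
      if m1 < right then [t + m1 + 2, rt + 1]
      else
        let m2 := m1 - right
        let bottom := if t < bt then rt - l else 0
        if m2 < bottom then [bt + 1, rt - m2]
        else
          let m3 := m2 - bottom
          let left := if l < rt then bt - t - 1 else 0
          if m3 < left then [bt - m3, l + 1]
          else solRing (t + 1) (bt - 1) (l + 1) (rt - 1) (m3 - left)
  else [0, 0]
termination_by (bt + 1 - t).toNat
decreasing_by omega

def solution_alt (c : Int) (r : Int) (k : Int) : List Int :=
  if c * r < k then [0, 0]
  else if k < 2 then [1, 1]
  else solRing 0 (c - 1) 0 (r - 1) (k - 1)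

-- ===== PRECONDITION & SPEC =====
-- Pre_ excludes only inputs on which A's while loop never terminates (2 ≤ k ≤ c*r is only
-- possible with both c and r negative when the grid is degenerate; A then spins turning forever).
def Pre_solution (c : Int) (r : Int) (k : Int) : Prop := 2 ≤ k → k ≤ c * r → 1 ≤ c ∧ 1 ≤ r
instance (c : Int) (r : Int) (k : Int) : Decidable (Pre_solution c r k) := by
  unfold Pre_solution; infer_instance
def pvWitness_solution : Int × Int × Int := (3, 4, 7)

def Spec_solution (c : Int) (r : Int) (k : Int) (out : List Int) : Prop := out = solution_alt c r k
instance (c : Int) (r : Int) (k : Int) (out : List Int) : Decidable (Spec_solution c r k out) := by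
  unfold Spec_solution; infer_instance

-- ===== CLAIM (what is proved, stated in full; the proofs are below) =====
def Claim_equal_solution : Prop := ∀ (c : Int) (r : Int) (k : Int), Dom_solution c r k → Pre_solution c r k → Spec_solution c r k (solution c r k)

-- ===== LEMMAS AND PROOFS =====

-- seats-matrix abstraction: lengths are right and occupancy is described by the predicate P
def seatOK (c r : Int) (seats : List (List Int)) (P : Int → Int → Prop) : Prop :=
  seats.length = c.toNat ∧
  (∀ a : Int, 0 ≤ a → a < c → (PySem.List.pyGetD seats a []).length = r.toNat) ∧
  (∀ a b : Int, 0 ≤ a → a < c → 0 ≤ b → b < r → (seatGet seats a b ≠ 0 ↔ P a b))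

lemma seatOK_congr {c r : Int} {seats : List (List Int)} {P Q : Int → Int → Prop}
    (hOK : seatOK c r seats P)
    (h : ∀ a b : Int, 0 ≤ a → a < c → 0 ≤ b → b < r → (P a b ↔ Q a b)) :
    seatOK c r seats Q := by
  refine ⟨hOK.1, hOK.2.1, fun a b ha hac hb hbr => ?_⟩
  rw [hOK.2.2 a b ha hac hb hbr, h a b ha hac hb hbr]

lemma seatOK_init (c r : Int) :
    seatOK c r (List.replicate c.toNat (List.replicate r.toNat 0)) (fun _ _ => False) := by
  refine ⟨by simp, fun a ha hac => ?_, fun a b ha hac hb hbr => ?_⟩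
  · rw [PySem.List.pyGetD_of_nonneg _ _ ha, List.getD_replicate _ (by omega)]; simp
  · rw [seatGet, PySem.List.pyGetD_of_nonneg _ _ ha, List.getD_replicate _ (by omega),
      PySem.List.pyGetD_of_nonneg _ _ hb, List.getD_replicate _ (by omega)]
    simp


lemma seatOK_set {c r : Int} {seats : List (List Int)} {P : Int → Int → Prop}
    (hOK : seatOK c r seats P) {x y v : Int}
    (hx0 : 0 ≤ x) (hxc : x < c) (hy0 : 0 ≤ y) (hyr : y < r) (hv : v ≠ 0) :
    seatOK c r (seatSet seats x y v) (fun a b => P a b ∨ (a = x ∧ b = y)) := by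
  obtain ⟨hlen, hrow, hget⟩ := hOK
  have hxlt : x.toNat < seats.length := by omega
  have hrowx : (PySem.List.pyGetD seats x []).length = r.toNat := hrow x hx0 hxc
  have hset : seatSet seats x y v
      = seats.set x.toNat ((seats.getD x.toNat []).set y.toNat v) := by
    rw [seatSet, PySem.List.pySetD_of_nonneg _ _ hx0, PySem.List.pySetD_of_nonneg _ _ hy0,
      PySem.List.pyGetD_of_nonneg _ _ hx0]
  have hrowx' : (seats.getD x.toNat []).length = r.toNat := by
    rw [← hrowx, PySem.List.pyGetD_of_nonneg _ _ hx0]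
  have hgetset : ∀ a : Int, 0 ≤ a → a < c →
      PySem.List.pyGetD (seatSet seats x y v) a []
        = if a = x then (seats.getD x.toNat []).set y.toNat v
          else PySem.List.pyGetD seats a [] := by
    intro a ha hac
    rw [hset, PySem.List.pyGetD_of_nonneg _ _ ha, PySem.List.pyGetD_of_nonneg _ _ ha]
    by_cases hax : a = x
    · subst hax
      simp [List.getD_eq_getElem?_getD, hxlt]
    · have : x.toNat ≠ a.toNat := by omega
      simp [List.getD_eq_getElem?_getD, this, hax]
  refine ⟨by rw [hset]; simpa using hlen, fun a ha hac => ?_, fun a b ha hac hb hbr => ?_⟩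
  · rw [hgetset a ha hac]
    by_cases hax : a = x
    · rw [if_pos hax, List.length_set]; exact hrowx'
    · rw [if_neg hax]; exact hrow a ha hac
  · rw [seatGet, hgetset a ha hac]
    by_cases hax : a = x
    · subst hax
      rw [if_pos rfl, PySem.List.pyGetD_of_nonneg _ _ hb]
      by_cases hby : b = y
      · subst hby
        rw [List.getD_eq_getElem?_getD, List.getElem?_set, if_pos rfl,
          if_pos (by rw [hrowx']; omega)]
        simp [hv]
      · have hne : y.toNat ≠ b.toNat := by omega
        have hg := hget a b ha hac hb hbr
        rw [seatGet, PySem.List.pyGetD_of_nonneg _ _ ha, PySem.List.pyGetD_of_nonneg _ _ hb] at hg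
        rw [List.getD_eq_getElem?_getD, List.getElem?_set, if_neg hne,
          ← List.getD_eq_getElem?_getD, hg]
        simp [hby]
    · rw [if_neg hax]
      have hg := hget a b ha hac hb hbr
      rw [seatGet] at hg
      rw [hg]
      simp [hax]


-- one loop iteration that turns (blocked ahead)
lemma loopA_turn {c r k dir x y cnt : Int} {seats : List (List Int)} (f : Nat)
    (hck : cnt < k)
    (hblock : x + PySem.List.pyGetD dxA dir 0 < 0 ∨ c ≤ x + PySem.List.pyGetD dxA dir 0 ∨
      y + PySem.List.pyGetD dyA dir 0 < 0 ∨ r ≤ y + PySem.List.pyGetD dyA dir 0 ∨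
      seatGet seats (x + PySem.List.pyGetD dxA dir 0) (y + PySem.List.pyGetD dyA dir 0) ≠ 0) :
    loopA (f + 1) c r k dir x y cnt seats
      = loopA f c r k (PySem.Int.mod (dir + 1) 4) x y cnt seats := by
  rw [loopA, if_pos hck, if_pos hblock]

-- one loop iteration that moves (free ahead)
lemma loopA_move {c r k dir x y cnt : Int} {seats : List (List Int)} (f : Nat)
    (hck : cnt < k)
    (hfree : ¬(x + PySem.List.pyGetD dxA dir 0 < 0 ∨ c ≤ x + PySem.List.pyGetD dxA dir 0 ∨
      y + PySem.List.pyGetD dyA dir 0 < 0 ∨ r ≤ y + PySem.List.pyGetD dyA dir 0 ∨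
      seatGet seats (x + PySem.List.pyGetD dxA dir 0) (y + PySem.List.pyGetD dyA dir 0) ≠ 0)) :
    loopA (f + 1) c r k dir x y cnt seats
      = loopA f c r k dir (x + PySem.List.pyGetD dxA dir 0) (y + PySem.List.pyGetD dyA dir 0)
          (cnt + 1) (seatSet seats x y cnt) := by
  rw [loopA, if_pos hck, if_neg hfree]

lemma loopA_stop {c r k dir x y cnt : Int} {seats : List (List Int)} (f : Nat)
    (h : ¬ cnt < k) : loopA (f + 1) c r k dir x y cnt seats = [x + 1, y + 1] := by
  rw [loopA, if_neg h]

lemma runRight (c r k t bt l rt : Int)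
    (h0t : 0 ≤ t) (hbc : bt ≤ c - 1) (h0l : 0 ≤ l) (hrr : rt ≤ r - 1)
    (htb : t ≤ bt) (hlr : l ≤ rt) :
    ∀ (s : Nat) (y cnt : Int) (seats : List (List Int)),
    (rt - y).toNat = s → l ≤ y → y ≤ rt → cnt ≤ k → 1 ≤ cnt →
    seatOK c r seats (fun a b => (a < t ∨ bt < a ∨ b < l ∨ rt < b) ∨ (a = t ∧ l ≤ b ∧ b < y)) →
    ((k - cnt ≤ rt - y → ∀ fuel : Nat, (k - cnt).toNat + 1 ≤ fuel →
        loopA fuel c r k 1 t y cnt seats = [t + 1, y + (k - cnt) + 1]) ∧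
     (rt - y < k - cnt → ∃ seats',
        seatOK c r seats' (fun a b => (a < t ∨ bt < a ∨ b < l ∨ rt < b) ∨ (a = t ∧ l ≤ b ∧ b < rt)) ∧
        ∀ g : Nat, loopA (g + s) c r k 1 t y cnt seats = loopA g c r k 1 t rt (cnt + (rt - y)) seats')) := by
  intro s
  induction s with
  | zero =>
    intro y cnt seats hs hly hyr hck hc1 hOK
    have hy : y = rt := by omega
    subst hy
    constructor
    · intro hin fuel hfuel
      have hkc : k = cnt := by omega
      obtain ⟨f, rfl⟩ : ∃ f, fuel = f + 1 := ⟨fuel - 1, by omega⟩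
      rw [loopA_stop f (by omega)]
      rw [show k - cnt = 0 by omega]
      norm_num
    · intro hout
      refine ⟨seats, hOK, fun g => ?_⟩
      rw [Nat.add_zero, show cnt + (y - y) = cnt by ring]
  | succ s ih =>
    intro y cnt seats hs hly hyr hck hc1 hOK
    have hylt : y < rt := by omega
    have edx : PySem.List.pyGetD dxA 1 0 = 0 := by decide
    have edy : PySem.List.pyGetD dyA 1 0 = 1 := by decide
    have hfree : ¬(t + PySem.List.pyGetD dxA 1 0 < 0 ∨ c ≤ t + PySem.List.pyGetD dxA 1 0 ∨
        y + PySem.List.pyGetD dyA 1 0 < 0 ∨ r ≤ y + PySem.List.pyGetD dyA 1 0 ∨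
        seatGet seats (t + PySem.List.pyGetD dxA 1 0) (y + PySem.List.pyGetD dyA 1 0) ≠ 0) := by
      rw [edx, edy]
      have h0 : seatGet seats (t + 0) (y + 1) = 0 := by
        have := (hOK.2.2 (t + 0) (y + 1) (by omega) (by omega) (by omega) (by omega))
        by_contra hne
        have := this.mp hne
        omega
      push_neg
      refine ⟨by omega, by omega, by omega, by omega, by simpa using h0⟩
    have hstep : cnt < k → ∀ f : Nat, loopA (f + 1) c r k 1 t y cnt seats
        = loopA f c r k 1 t (y + 1) (cnt + 1) (seatSet seats t y cnt) := by
      intro hck2 f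
      have := loopA_move (c := c) (r := r) (k := k) (dir := 1) (x := t) (y := y)
        (cnt := cnt) (seats := seats) f hck2 hfree
      rwa [edx, edy, add_zero] at this
    have hOK' : seatOK c r (seatSet seats t y cnt)
        (fun a b => (a < t ∨ bt < a ∨ b < l ∨ rt < b) ∨ (a = t ∧ l ≤ b ∧ b < y + 1)) := by
      refine seatOK_congr (seatOK_set hOK (by omega) (by omega) (by omega) (by omega) (by omega)) ?_
      intro a b ha hac hb hbr
      omega
    have ihs := ih (y + 1) (cnt + 1) (seatSet seats t y cnt) (by omega) (by omega) (by omega)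
    constructor
    · intro hin fuel hfuel
      by_cases hck2 : cnt < k
      · obtain ⟨f, rfl⟩ : ∃ f, fuel = f + 1 := ⟨fuel - 1, by omega⟩
        rw [hstep hck2 f]
        have := (ihs (by omega) (by omega) hOK').1 (by omega) f (by omega)
        rw [this]
        congr 2
        omega
      · obtain ⟨f, rfl⟩ : ∃ f, fuel = f + 1 := ⟨fuel - 1, by omega⟩
        rw [loopA_stop f hck2]
        rw [show k - cnt = 0 by omega]
        norm_num
    · intro hout
      obtain ⟨seats', hOK'', heq⟩ :=
        (ihs (by omega) (by omega) hOK').2 (by omega)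
      refine ⟨seats', hOK'', fun g => ?_⟩
      rw [show g + (s + 1) = (g + s) + 1 by omega, hstep (by omega) (g + s), heq g]
      congr 1
      omega

lemma runDown (c r k t bt l rt : Int)
    (h0t : 0 ≤ t) (hbc : bt ≤ c - 1) (h0l : 0 ≤ l) (hrr : rt ≤ r - 1)
    (htb : t ≤ bt) (hlr : l ≤ rt) :
    ∀ (s : Nat) (x cnt : Int) (seats : List (List Int)),
    (bt - x).toNat = s → t ≤ x → x ≤ bt → cnt ≤ k → 1 ≤ cnt →
    seatOK c r seats (fun a b => (a < t ∨ bt < a ∨ b < l ∨ rt < b) ∨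
      (a = t ∧ l ≤ b ∧ b < rt) ∨ (b = rt ∧ t ≤ a ∧ a < x)) →
    ((k - cnt ≤ bt - x → ∀ fuel : Nat, (k - cnt).toNat + 1 ≤ fuel →
        loopA fuel c r k 2 x rt cnt seats = [x + (k - cnt) + 1, rt + 1]) ∧
     (bt - x < k - cnt → ∃ seats',
        seatOK c r seats' (fun a b => (a < t ∨ bt < a ∨ b < l ∨ rt < b) ∨
          (a = t ∧ l ≤ b ∧ b < rt) ∨ (b = rt ∧ t ≤ a ∧ a < bt)) ∧
        ∀ g : Nat, loopA (g + s) c r k 2 x rt cnt seats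
          = loopA g c r k 2 bt rt (cnt + (bt - x)) seats')) := by
  intro s
  induction s with
  | zero =>
    intro x cnt seats hs hlx hxr hck hc1 hOK
    have hy : x = bt := by omega
    subst hy
    constructor
    · intro hin fuel hfuel
      obtain ⟨f, rfl⟩ : ∃ f, fuel = f + 1 := ⟨fuel - 1, by omega⟩
      rw [loopA_stop f (by omega), show k - cnt = 0 by omega]
      norm_num
    · intro hout
      refine ⟨seats, hOK, fun g => ?_⟩
      rw [Nat.add_zero, show cnt + (x - x) = cnt by ring]
  | succ s ih =>
    intro x cnt seats hs hlx hxr hck hc1 hOK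
    have hxlt : x < bt := by omega
    have edx : PySem.List.pyGetD dxA 2 0 = 1 := by decide
    have edy : PySem.List.pyGetD dyA 2 0 = 0 := by decide
    have hfree : ¬(x + PySem.List.pyGetD dxA 2 0 < 0 ∨ c ≤ x + PySem.List.pyGetD dxA 2 0 ∨
        rt + PySem.List.pyGetD dyA 2 0 < 0 ∨ r ≤ rt + PySem.List.pyGetD dyA 2 0 ∨
        seatGet seats (x + PySem.List.pyGetD dxA 2 0) (rt + PySem.List.pyGetD dyA 2 0) ≠ 0) := by
      rw [edx, edy]
      have h0 : seatGet seats (x + 1) (rt + 0) = 0 := by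
        have := (hOK.2.2 (x + 1) (rt + 0) (by omega) (by omega) (by omega) (by omega))
        by_contra hne
        have := this.mp hne
        omega
      push_neg
      refine ⟨by omega, by omega, by omega, by omega, by simpa using h0⟩
    have hstep : cnt < k → ∀ f : Nat, loopA (f + 1) c r k 2 x rt cnt seats
        = loopA f c r k 2 (x + 1) rt (cnt + 1) (seatSet seats x rt cnt) := by
      intro hck2 f
      have := loopA_move (c := c) (r := r) (k := k) (dir := 2) (x := x) (y := rt)
        (cnt := cnt) (seats := seats) f hck2 hfree
      rwa [edx, edy, add_zero] at this
    have hOK' : seatOK c r (seatSet seats x rt cnt)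
        (fun a b => (a < t ∨ bt < a ∨ b < l ∨ rt < b) ∨
          (a = t ∧ l ≤ b ∧ b < rt) ∨ (b = rt ∧ t ≤ a ∧ a < x + 1)) := by
      refine seatOK_congr (seatOK_set hOK (by omega) (by omega) (by omega) (by omega) (by omega)) ?_
      intro a b ha hac hb hbr
      omega
    have ihs := ih (x + 1) (cnt + 1) (seatSet seats x rt cnt) (by omega) (by omega) (by omega)
    constructor
    · intro hin fuel hfuel
      by_cases hck2 : cnt < k
      · obtain ⟨f, rfl⟩ : ∃ f, fuel = f + 1 := ⟨fuel - 1, by omega⟩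
        rw [hstep hck2 f]
        rw [(ihs (by omega) (by omega) hOK').1 (by omega) f (by omega)]
        congr 2
        omega
      · obtain ⟨f, rfl⟩ : ∃ f, fuel = f + 1 := ⟨fuel - 1, by omega⟩
        rw [loopA_stop f hck2, show k - cnt = 0 by omega]
        norm_num
    · intro hout
      obtain ⟨seats', hOK'', heq⟩ := (ihs (by omega) (by omega) hOK').2 (by omega)
      refine ⟨seats', hOK'', fun g => ?_⟩
      rw [show g + (s + 1) = (g + s) + 1 by omega, hstep (by omega) (g + s), heq g]
      congr 1
      omega

lemma runLeft (c r k t bt l rt : Int)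
    (h0t : 0 ≤ t) (hbc : bt ≤ c - 1) (h0l : 0 ≤ l) (hrr : rt ≤ r - 1)
    (htb : t < bt) (hlr : l ≤ rt) :
    ∀ (s : Nat) (y cnt : Int) (seats : List (List Int)),
    (y - l).toNat = s → l ≤ y → y ≤ rt → cnt ≤ k → 1 ≤ cnt →
    seatOK c r seats (fun a b => (a < t ∨ bt < a ∨ b < l ∨ rt < b) ∨
      (a = t ∧ l ≤ b ∧ b < rt) ∨ (b = rt ∧ t ≤ a ∧ a < bt) ∨ (a = bt ∧ y < b ∧ b ≤ rt)) →
    ((k - cnt ≤ y - l → ∀ fuel : Nat, (k - cnt).toNat + 1 ≤ fuel →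
        loopA fuel c r k 3 bt y cnt seats = [bt + 1, y - (k - cnt) + 1]) ∧
     (y - l < k - cnt → ∃ seats',
        seatOK c r seats' (fun a b => (a < t ∨ bt < a ∨ b < l ∨ rt < b) ∨
          (a = t ∧ l ≤ b ∧ b < rt) ∨ (b = rt ∧ t ≤ a ∧ a < bt) ∨ (a = bt ∧ l < b ∧ b ≤ rt)) ∧
        ∀ g : Nat, loopA (g + s) c r k 3 bt y cnt seats
          = loopA g c r k 3 bt l (cnt + (y - l)) seats')) := by
  intro s
  induction s with
  | zero =>
    intro y cnt seats hs hly hyr hck hc1 hOK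
    have hy : y = l := by omega
    subst hy
    constructor
    · intro hin fuel hfuel
      obtain ⟨f, rfl⟩ : ∃ f, fuel = f + 1 := ⟨fuel - 1, by omega⟩
      rw [loopA_stop f (by omega), show k - cnt = 0 by omega]
      norm_num
    · intro hout
      refine ⟨seats, hOK, fun g => ?_⟩
      rw [Nat.add_zero, show cnt + (y - y) = cnt by ring]
  | succ s ih =>
    intro y cnt seats hs hly hyr hck hc1 hOK
    have hylt : l < y := by omega
    have edx : PySem.List.pyGetD dxA 3 0 = 0 := by decide
    have edy : PySem.List.pyGetD dyA 3 0 = -1 := by decide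
    have hfree : ¬(bt + PySem.List.pyGetD dxA 3 0 < 0 ∨ c ≤ bt + PySem.List.pyGetD dxA 3 0 ∨
        y + PySem.List.pyGetD dyA 3 0 < 0 ∨ r ≤ y + PySem.List.pyGetD dyA 3 0 ∨
        seatGet seats (bt + PySem.List.pyGetD dxA 3 0) (y + PySem.List.pyGetD dyA 3 0) ≠ 0) := by
      rw [edx, edy]
      have h0 : seatGet seats (bt + 0) (y + -1) = 0 := by
        have := (hOK.2.2 (bt + 0) (y + -1) (by omega) (by omega) (by omega) (by omega))
        by_contra hne
        have := this.mp hne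
        omega
      push_neg
      refine ⟨by omega, by omega, by omega, by omega, by simpa using h0⟩
    have hstep : cnt < k → ∀ f : Nat, loopA (f + 1) c r k 3 bt y cnt seats
        = loopA f c r k 3 bt (y - 1) (cnt + 1) (seatSet seats bt y cnt) := by
      intro hck2 f
      have := loopA_move (c := c) (r := r) (k := k) (dir := 3) (x := bt) (y := y)
        (cnt := cnt) (seats := seats) f hck2 hfree
      rwa [edx, edy, add_zero, show y + -1 = y - 1 by ring] at this
    have hOK' : seatOK c r (seatSet seats bt y cnt)
        (fun a b => (a < t ∨ bt < a ∨ b < l ∨ rt < b) ∨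
          (a = t ∧ l ≤ b ∧ b < rt) ∨ (b = rt ∧ t ≤ a ∧ a < bt) ∨ (a = bt ∧ y - 1 < b ∧ b ≤ rt)) := by
      refine seatOK_congr (seatOK_set hOK (by omega) (by omega) (by omega) (by omega) (by omega)) ?_
      intro a b ha hac hb hbr
      omega
    have ihs := ih (y - 1) (cnt + 1) (seatSet seats bt y cnt) (by omega) (by omega) (by omega)
    constructor
    · intro hin fuel hfuel
      by_cases hck2 : cnt < k
      · obtain ⟨f, rfl⟩ : ∃ f, fuel = f + 1 := ⟨fuel - 1, by omega⟩
        rw [hstep hck2 f]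
        rw [(ihs (by omega) (by omega) hOK').1 (by omega) f (by omega)]
        congr 2
        omega
      · obtain ⟨f, rfl⟩ : ∃ f, fuel = f + 1 := ⟨fuel - 1, by omega⟩
        rw [loopA_stop f hck2, show k - cnt = 0 by omega]
        norm_num
    · intro hout
      obtain ⟨seats', hOK'', heq⟩ := (ihs (by omega) (by omega) hOK').2 (by omega)
      refine ⟨seats', hOK'', fun g => ?_⟩
      rw [show g + (s + 1) = (g + s) + 1 by omega, hstep (by omega) (g + s), heq g]
      congr 1
      omega

lemma runUp (c r k t bt l rt : Int)
    (h0t : 0 ≤ t) (hbc : bt ≤ c - 1) (h0l : 0 ≤ l) (hrr : rt ≤ r - 1)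
    (htb : t < bt) (hlr : l < rt) :
    ∀ (s : Nat) (x cnt : Int) (seats : List (List Int)),
    (x - (t + 1)).toNat = s → t + 1 ≤ x → x ≤ bt → cnt ≤ k → 1 ≤ cnt →
    seatOK c r seats (fun a b => (a < t ∨ bt < a ∨ b < l ∨ rt < b) ∨
      (a = t ∧ l ≤ b ∧ b < rt) ∨ (b = rt ∧ t ≤ a ∧ a < bt) ∨ (a = bt ∧ l < b ∧ b ≤ rt) ∨
      (b = l ∧ x < a ∧ a ≤ bt)) →
    ((k - cnt ≤ x - (t + 1) → ∀ fuel : Nat, (k - cnt).toNat + 1 ≤ fuel →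
        loopA fuel c r k 0 x l cnt seats = [x - (k - cnt) + 1, l + 1]) ∧
     (x - (t + 1) < k - cnt → ∃ seats',
        seatOK c r seats' (fun a b => (a < t ∨ bt < a ∨ b < l ∨ rt < b) ∨
          (a = t ∧ l ≤ b ∧ b < rt) ∨ (b = rt ∧ t ≤ a ∧ a < bt) ∨ (a = bt ∧ l < b ∧ b ≤ rt) ∨
          (b = l ∧ t + 1 < a ∧ a ≤ bt)) ∧
        ∀ g : Nat, loopA (g + s) c r k 0 x l cnt seats
          = loopA g c r k 0 (t + 1) l (cnt + (x - (t + 1))) seats')) := by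
  intro s
  induction s with
  | zero =>
    intro x cnt seats hs hlx hxr hck hc1 hOK
    have hy : x = t + 1 := by omega
    subst hy
    constructor
    · intro hin fuel hfuel
      obtain ⟨f, rfl⟩ : ∃ f, fuel = f + 1 := ⟨fuel - 1, by omega⟩
      rw [loopA_stop f (by omega), show k - cnt = 0 by omega]
      norm_num
    · intro hout
      refine ⟨seats, hOK, fun g => ?_⟩
      rw [Nat.add_zero, show cnt + (t + 1 - (t + 1)) = cnt by ring]
  | succ s ih =>
    intro x cnt seats hs hlx hxr hck hc1 hOK
    have hxlt : t + 1 < x := by omega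
    have edx : PySem.List.pyGetD dxA 0 0 = -1 := by decide
    have edy : PySem.List.pyGetD dyA 0 0 = 0 := by decide
    have hfree : ¬(x + PySem.List.pyGetD dxA 0 0 < 0 ∨ c ≤ x + PySem.List.pyGetD dxA 0 0 ∨
        l + PySem.List.pyGetD dyA 0 0 < 0 ∨ r ≤ l + PySem.List.pyGetD dyA 0 0 ∨
        seatGet seats (x + PySem.List.pyGetD dxA 0 0) (l + PySem.List.pyGetD dyA 0 0) ≠ 0) := by
      rw [edx, edy]
      have h0 : seatGet seats (x + -1) (l + 0) = 0 := by
        have := (hOK.2.2 (x + -1) (l + 0) (by omega) (by omega) (by omega) (by omega))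
        by_contra hne
        have := this.mp hne
        omega
      push_neg
      refine ⟨by omega, by omega, by omega, by omega, by simpa using h0⟩
    have hstep : cnt < k → ∀ f : Nat, loopA (f + 1) c r k 0 x l cnt seats
        = loopA f c r k 0 (x - 1) l (cnt + 1) (seatSet seats x l cnt) := by
      intro hck2 f
      have := loopA_move (c := c) (r := r) (k := k) (dir := 0) (x := x) (y := l)
        (cnt := cnt) (seats := seats) f hck2 hfree
      rwa [edx, edy, add_zero, show x + -1 = x - 1 by ring] at this
    have hOK' : seatOK c r (seatSet seats x l cnt)
        (fun a b => (a < t ∨ bt < a ∨ b < l ∨ rt < b) ∨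
          (a = t ∧ l ≤ b ∧ b < rt) ∨ (b = rt ∧ t ≤ a ∧ a < bt) ∨ (a = bt ∧ l < b ∧ b ≤ rt) ∨
          (b = l ∧ x - 1 < a ∧ a ≤ bt)) := by
      refine seatOK_congr (seatOK_set hOK (by omega) (by omega) (by omega) (by omega) (by omega)) ?_
      intro a b ha hac hb hbr
      omega
    have ihs := ih (x - 1) (cnt + 1) (seatSet seats x l cnt) (by omega) (by omega) (by omega)
    constructor
    · intro hin fuel hfuel
      by_cases hck2 : cnt < k
      · obtain ⟨f, rfl⟩ : ∃ f, fuel = f + 1 := ⟨fuel - 1, by omega⟩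
        rw [hstep hck2 f]
        rw [(ihs (by omega) (by omega) hOK').1 (by omega) f (by omega)]
        congr 2
        omega
      · obtain ⟨f, rfl⟩ : ∃ f, fuel = f + 1 := ⟨fuel - 1, by omega⟩
        rw [loopA_stop f hck2, show k - cnt = 0 by omega]
        norm_num
    · intro hout
      obtain ⟨seats', hOK'', heq⟩ := (ihs (by omega) (by omega) hOK').2 (by omega)
      refine ⟨seats', hOK'', fun g => ?_⟩
      rw [show g + (s + 1) = (g + s) + 1 by omega, hstep (by omega) (g + s), heq g]
      congr 1
      omega

lemma solRing_top {t bt l rt m : Int} (h1 : t ≤ bt) (h2 : l ≤ rt) (hm : m < rt - l + 1) :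
    solRing t bt l rt m = [t + 1, l + m + 1] := by
  rw [solRing, dif_pos ⟨h1, h2⟩, if_pos hm]

lemma solRing_right {t bt l rt m : Int} (h1 : t ≤ bt) (h2 : l ≤ rt)
    (hm : ¬ m < rt - l + 1) (hm1 : m - (rt - l + 1) < bt - t) :
    solRing t bt l rt m = [t + (m - (rt - l + 1)) + 2, rt + 1] := by
  rw [solRing, dif_pos ⟨h1, h2⟩, if_neg hm, if_pos hm1]

lemma solRing_bottom {t bt l rt m : Int} (h1 : t < bt) (h2 : l ≤ rt)
    (hm : ¬ m < rt - l + 1) (hm1 : ¬ m - (rt - l + 1) < bt - t)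
    (hm2 : m - (rt - l + 1) - (bt - t) < rt - l) :
    solRing t bt l rt m = [bt + 1, rt - (m - (rt - l + 1) - (bt - t))] := by
  rw [solRing, dif_pos ⟨by omega, h2⟩, if_neg hm, if_neg hm1, if_pos h1, if_pos hm2]

lemma solRing_left {t bt l rt m : Int} (h1 : t < bt) (h2 : l < rt)
    (hm : ¬ m < rt - l + 1) (hm1 : ¬ m - (rt - l + 1) < bt - t)
    (hm2 : ¬ m - (rt - l + 1) - (bt - t) < rt - l)
    (hm3 : m - (rt - l + 1) - (bt - t) - (rt - l) < bt - t - 1) :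
    solRing t bt l rt m = [bt - (m - (rt - l + 1) - (bt - t) - (rt - l)), l + 1] := by
  rw [solRing, dif_pos ⟨by omega, by omega⟩, if_neg hm, if_neg hm1, if_pos h1, if_neg hm2,
    if_pos h2, if_pos hm3]

lemma solRing_step {t bt l rt m : Int} (h1 : t < bt) (h2 : l < rt)
    (hm : ¬ m < rt - l + 1) (hm1 : ¬ m - (rt - l + 1) < bt - t)
    (hm2 : ¬ m - (rt - l + 1) - (bt - t) < rt - l)
    (hm3 : ¬ m - (rt - l + 1) - (bt - t) - (rt - l) < bt - t - 1) :
    solRing t bt l rt m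
      = solRing (t + 1) (bt - 1) (l + 1) (rt - 1) (m - (2 * (rt - l) + 2 * (bt - t))) := by
  rw [solRing, dif_pos ⟨by omega, by omega⟩, if_neg hm, if_neg hm1, if_pos h1, if_neg hm2,
    if_pos h2, if_neg hm3]
  congr 1
  ring

set_option maxHeartbeats 8000000 in
lemma master (n : Nat) : ∀ (c r k t bt l rt m cnt : Int) (seats : List (List Int)) (fuel : Nat),
    (bt - t).toNat ≤ n →
    0 ≤ t → bt ≤ c - 1 → 0 ≤ l → rt ≤ r - 1 → t ≤ bt → l ≤ rt →
    m = k - cnt → 0 ≤ m → m < (bt - t + 1) * (rt - l + 1) → 1 ≤ cnt →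
    seatOK c r seats (fun a b => a < t ∨ bt < a ∨ b < l ∨ rt < b) →
    2 * m.toNat + 8 ≤ fuel →
    loopA fuel c r k 1 t l cnt seats = solRing t bt l rt m := by
  induction n using Nat.strong_induction_on with
  | _ n IH =>
  intro c r k t bt l rt m cnt seats fuel hn h0t hbc h0l hrr htb hlr hm h0m hprod hc1 hOK hfuel
  have hOK0 : seatOK c r seats (fun a b => (a < t ∨ bt < a ∨ b < l ∨ rt < b) ∨
      (a = t ∧ l ≤ b ∧ b < l)) := seatOK_congr hOK (by intro a b ha hac hb hbr; omega)
  have hRR := runRight c r k t bt l rt h0t hbc h0l hrr htb hlr (rt - l).toNat l cnt seats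
    (by omega) (by omega) (by omega) (by omega) hc1 hOK0
  by_cases case1 : m ≤ rt - l
  · have hres := hRR.1 (by omega) fuel (by omega)
    clear hRR hOK0 hOK IH
    rw [hres, solRing_top htb hlr (by omega)]
    simp only [List.cons.injEq, true_and, and_true]
    omega
  · obtain ⟨seats1, hOK1, heq1⟩ := hRR.2 (by omega)
    clear hRR hOK0 hOK
    have hck1 : cnt + (rt - l) < k := by omega
    have hblock1 : t + PySem.List.pyGetD dxA 1 0 < 0 ∨ c ≤ t + PySem.List.pyGetD dxA 1 0 ∨
        rt + PySem.List.pyGetD dyA 1 0 < 0 ∨ r ≤ rt + PySem.List.pyGetD dyA 1 0 ∨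
        seatGet seats1 (t + PySem.List.pyGetD dxA 1 0) (rt + PySem.List.pyGetD dyA 1 0) ≠ 0 := by
      rw [show PySem.List.pyGetD dxA 1 0 = 0 from by decide,
        show PySem.List.pyGetD dyA 1 0 = 1 from by decide]
      by_cases h : r ≤ rt + 1
      · exact Or.inr (Or.inr (Or.inr (Or.inl h)))
      · refine Or.inr (Or.inr (Or.inr (Or.inr ?_)))
        rw [hOK1.2.2 (t + 0) (rt + 1) (by omega) (by omega) (by omega) (by omega)]
        omega
    have hturn1 : ∀ f : Nat, loopA (f + 1) c r k 1 t rt (cnt + (rt - l)) seats1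
        = loopA f c r k 2 t rt (cnt + (rt - l)) seats1 := by
      intro f
      have := loopA_turn f hck1 hblock1
      rwa [show PySem.Int.mod (1 + 1) 4 = 2 from by decide] at this
    clear hblock1
    have hOK1' : seatOK c r seats1 (fun a b => (a < t ∨ bt < a ∨ b < l ∨ rt < b) ∨
        (a = t ∧ l ≤ b ∧ b < rt) ∨ (b = rt ∧ t ≤ a ∧ a < t)) :=
      seatOK_congr hOK1 (by intro a b ha hac hb hbr; omega)
    have hRD := runDown c r k t bt l rt h0t hbc h0l hrr htb hlr (bt - t).toNat t
      (cnt + (rt - l)) seats1 (by omega) (by omega) (by omega) (by omega) (by omega) hOK1'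
    clear hOK1'
    by_cases case2 : m - (rt - l + 1) < bt - t
    · have hres := hRD.1 (by omega) (fuel - (rt - l).toNat - 1) (by omega)
      clear hRD hOK1 IH
      rw [show fuel = ((fuel - (rt - l).toNat - 1) + 1) + (rt - l).toNat from by omega,
        heq1 ((fuel - (rt - l).toNat - 1) + 1), hturn1 (fuel - (rt - l).toNat - 1), hres,
        solRing_right htb hlr (by omega) (by omega)]
      simp only [List.cons.injEq, true_and, and_true]
      omega
    · obtain ⟨seats2, hOK2, heq2⟩ := hRD.2 (by omega)
      clear hRD
      have htlt : t < bt := by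
        by_contra hcon
        have hbt : bt = t := by omega
        rw [hbt] at hprod
        have he : (t - t + 1) * (rt - l + 1) = rt - l + 1 := by ring
        rw [he] at hprod
        omega
      have hck2 : cnt + (rt - l) + (bt - t) < k := by omega
      have hblock2 : bt + PySem.List.pyGetD dxA 2 0 < 0 ∨ c ≤ bt + PySem.List.pyGetD dxA 2 0 ∨
          rt + PySem.List.pyGetD dyA 2 0 < 0 ∨ r ≤ rt + PySem.List.pyGetD dyA 2 0 ∨
          seatGet seats2 (bt + PySem.List.pyGetD dxA 2 0) (rt + PySem.List.pyGetD dyA 2 0) ≠ 0 := by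
        rw [show PySem.List.pyGetD dxA 2 0 = 1 from by decide,
          show PySem.List.pyGetD dyA 2 0 = 0 from by decide]
        by_cases h : c ≤ bt + 1
        · exact Or.inr (Or.inl h)
        · refine Or.inr (Or.inr (Or.inr (Or.inr ?_)))
          rw [hOK2.2.2 (bt + 1) (rt + 0) (by omega) (by omega) (by omega) (by omega)]
          omega
      have hturn2 : ∀ f : Nat, loopA (f + 1) c r k 2 bt rt (cnt + (rt - l) + (bt - t)) seats2
          = loopA f c r k 3 bt rt (cnt + (rt - l) + (bt - t)) seats2 := by
        intro f
        have := loopA_turn f hck2 hblock2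
        rwa [show PySem.Int.mod (2 + 1) 4 = 3 from by decide] at this
      clear hblock2
      have hOK2' : seatOK c r seats2 (fun a b => (a < t ∨ bt < a ∨ b < l ∨ rt < b) ∨
          (a = t ∧ l ≤ b ∧ b < rt) ∨ (b = rt ∧ t ≤ a ∧ a < bt) ∨ (a = bt ∧ rt < b ∧ b ≤ rt)) :=
        seatOK_congr hOK2 (by intro a b ha hac hb hbr; omega)
      have hRL := runLeft c r k t bt l rt h0t hbc h0l hrr htlt hlr (rt - l).toNat rt
        (cnt + (rt - l) + (bt - t)) seats2 (by omega) (by omega) (by omega) (by omega)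
        (by omega) hOK2'
      clear hOK2'
      by_cases case3 : m - (rt - l + 1) - (bt - t) < rt - l
      · have hres := hRL.1 (by omega) (fuel - (rt - l).toNat - 1 - (bt - t).toNat - 1) (by omega)
        clear hRL hOK1 hOK2 IH
        rw [show fuel = ((((fuel - (rt - l).toNat - 1 - (bt - t).toNat - 1) + 1)
              + (bt - t).toNat) + 1) + (rt - l).toNat from by omega,
          heq1 _, hturn1 _, heq2 _, hturn2 _, hres,
          solRing_bottom htlt hlr (by omega) (by omega) (by omega)]
        simp only [List.cons.injEq, true_and, and_true]
        omega
      · obtain ⟨seats3, hOK3, heq3⟩ := hRL.2 (by omega)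
        clear hRL
        have hllt : l < rt := by
          by_contra hcon
          have hrtl : rt = l := by omega
          rw [hrtl] at hprod
          have he : (bt - t + 1) * (l - l + 1) = bt - t + 1 := by ring
          rw [he] at hprod
          omega
        have hck3 : cnt + (rt - l) + (bt - t) + (rt - l) < k := by omega
        have hblock3 : bt + PySem.List.pyGetD dxA 3 0 < 0 ∨ c ≤ bt + PySem.List.pyGetD dxA 3 0 ∨
            l + PySem.List.pyGetD dyA 3 0 < 0 ∨ r ≤ l + PySem.List.pyGetD dyA 3 0 ∨
            seatGet seats3 (bt + PySem.List.pyGetD dxA 3 0) (l + PySem.List.pyGetD dyA 3 0) ≠ 0 := by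
          rw [show PySem.List.pyGetD dxA 3 0 = 0 from by decide,
            show PySem.List.pyGetD dyA 3 0 = -1 from by decide]
          by_cases h : l + -1 < 0
          · exact Or.inr (Or.inr (Or.inl h))
          · refine Or.inr (Or.inr (Or.inr (Or.inr ?_)))
            rw [hOK3.2.2 (bt + 0) (l + -1) (by omega) (by omega) (by omega) (by omega)]
            omega
        have hturn3 : ∀ f : Nat,
            loopA (f + 1) c r k 3 bt l (cnt + (rt - l) + (bt - t) + (rt - l)) seats3
              = loopA f c r k 0 bt l (cnt + (rt - l) + (bt - t) + (rt - l)) seats3 := by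
          intro f
          have := loopA_turn f hck3 hblock3
          rwa [show PySem.Int.mod (3 + 1) 4 = 0 from by decide] at this
        clear hblock3
        have hOK3' : seatOK c r seats3 (fun a b => (a < t ∨ bt < a ∨ b < l ∨ rt < b) ∨
            (a = t ∧ l ≤ b ∧ b < rt) ∨ (b = rt ∧ t ≤ a ∧ a < bt) ∨ (a = bt ∧ l < b ∧ b ≤ rt) ∨
            (b = l ∧ bt < a ∧ a ≤ bt)) :=
          seatOK_congr hOK3 (by intro a b ha hac hb hbr; omega)
        have hRU := runUp c r k t bt l rt h0t hbc h0l hrr htlt hllt (bt - (t + 1)).toNat bt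
          (cnt + (rt - l) + (bt - t) + (rt - l)) seats3 (by omega) (by omega) (by omega)
          (by omega) (by omega) hOK3'
        clear hOK3'
        by_cases case4 : m - (rt - l + 1) - (bt - t) - (rt - l) < bt - t - 1
        · have hres := hRU.1 (by omega)
            (fuel - (rt - l).toNat - 1 - (bt - t).toNat - 1 - (rt - l).toNat - 1) (by omega)
          clear hRU hOK1 hOK2 hOK3 IH
          rw [show fuel = ((((((fuel - (rt - l).toNat - 1 - (bt - t).toNat - 1
                - (rt - l).toNat - 1) + 1) + (rt - l).toNat) + 1) + (bt - t).toNat) + 1)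
                + (rt - l).toNat from by omega,
            heq1 _, hturn1 _, heq2 _, hturn2 _, heq3 _, hturn3 _, hres,
            solRing_left htlt hllt (by omega) (by omega) (by omega) (by omega)]
          simp only [List.cons.injEq, true_and, and_true]
          omega
        · obtain ⟨seats4, hOK4, heq4⟩ := hRU.2 (by omega)
          clear hRU hOK1 hOK2 hOK3
          have hbt2 : t + 2 ≤ bt := by
            by_contra hcon
            have hbt : bt = t + 1 := by omega
            rw [hbt] at hprod
            have he : (t + 1 - t + 1) * (rt - l + 1) = 2 * (rt - l) + 2 := by ring
            rw [he] at hprod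
            omega
          have hrt2 : l + 2 ≤ rt := by
            by_contra hcon
            have hrtl : rt = l + 1 := by omega
            rw [hrtl] at hprod
            have he : (bt - t + 1) * (l + 1 - l + 1) = 2 * (bt - t) + 2 := by ring
            rw [he] at hprod
            omega
          have hck4 : cnt + (rt - l) + (bt - t) + (rt - l) + (bt - (t + 1)) < k := by omega
          have hblock4 : t + 1 + PySem.List.pyGetD dxA 0 0 < 0 ∨
              c ≤ t + 1 + PySem.List.pyGetD dxA 0 0 ∨
              l + PySem.List.pyGetD dyA 0 0 < 0 ∨ r ≤ l + PySem.List.pyGetD dyA 0 0 ∨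
              seatGet seats4 (t + 1 + PySem.List.pyGetD dxA 0 0)
                (l + PySem.List.pyGetD dyA 0 0) ≠ 0 := by
            rw [show PySem.List.pyGetD dxA 0 0 = -1 from by decide,
              show PySem.List.pyGetD dyA 0 0 = 0 from by decide]
            refine Or.inr (Or.inr (Or.inr (Or.inr ?_)))
            rw [hOK4.2.2 (t + 1 + -1) (l + 0) (by omega) (by omega) (by omega) (by omega)]
            omega
          have hturn4 : ∀ f : Nat,
              loopA (f + 1) c r k 0 (t + 1) l
                  (cnt + (rt - l) + (bt - t) + (rt - l) + (bt - (t + 1))) seats4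
                = loopA f c r k 1 (t + 1) l
                  (cnt + (rt - l) + (bt - t) + (rt - l) + (bt - (t + 1))) seats4 := by
            intro f
            have := loopA_turn f hck4 hblock4
            rwa [show PySem.Int.mod (0 + 1) 4 = 1 from by decide] at this
          clear hblock4
          have hfree5 : ¬(t + 1 + PySem.List.pyGetD dxA 1 0 < 0 ∨
              c ≤ t + 1 + PySem.List.pyGetD dxA 1 0 ∨
              l + PySem.List.pyGetD dyA 1 0 < 0 ∨ r ≤ l + PySem.List.pyGetD dyA 1 0 ∨
              seatGet seats4 (t + 1 + PySem.List.pyGetD dxA 1 0)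
                (l + PySem.List.pyGetD dyA 1 0) ≠ 0) := by
            rw [show PySem.List.pyGetD dxA 1 0 = 0 from by decide,
              show PySem.List.pyGetD dyA 1 0 = 1 from by decide]
            have h0 : seatGet seats4 (t + 1 + 0) (l + 1) = 0 := by
              have hiff := hOK4.2.2 (t + 1 + 0) (l + 1) (by omega) (by omega) (by omega) (by omega)
              by_contra hne
              have := hiff.mp hne
              omega
            push_neg
            refine ⟨by omega, by omega, by omega, by omega, by simpa using h0⟩
          have hstep5 : ∀ f : Nat,
              loopA (f + 1) c r k 1 (t + 1) l
                  (cnt + (rt - l) + (bt - t) + (rt - l) + (bt - (t + 1))) seats4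
                = loopA f c r k 1 (t + 1) (l + 1)
                  (cnt + (rt - l) + (bt - t) + (rt - l) + (bt - (t + 1)) + 1)
                  (seatSet seats4 (t + 1) l
                    (cnt + (rt - l) + (bt - t) + (rt - l) + (bt - (t + 1)))) := by
            intro f
            have := loopA_move f hck4 hfree5
            rwa [show PySem.List.pyGetD dxA 1 0 = 0 from by decide,
              show PySem.List.pyGetD dyA 1 0 = 1 from by decide, add_zero] at this
          clear hfree5
          have hOK5 : seatOK c r (seatSet seats4 (t + 1) l
              (cnt + (rt - l) + (bt - t) + (rt - l) + (bt - (t + 1))))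
              (fun a b => a < t + 1 ∨ bt - 1 < a ∨ b < l + 1 ∨ rt - 1 < b) := by
            refine seatOK_congr (seatOK_set hOK4 (by omega) (by omega) (by omega) (by omega)
              (by omega)) ?_
            intro a b ha hac hb hbr
            omega
          have hprodkey : (bt - t + 1) * (rt - l + 1) - (2 * (rt - l) + 2 * (bt - t))
              = (bt - 1 - (t + 1) + 1) * (rt - 1 - (l + 1) + 1) := by ring
          clear hOK4
          have hrec := IH (bt - 1 - (t + 1)).toNat (by omega) c r k (t + 1) (bt - 1) (l + 1)
            (rt - 1) (m - (2 * (rt - l) + 2 * (bt - t)))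
            (cnt + (rt - l) + (bt - t) + (rt - l) + (bt - (t + 1)) + 1)
            (seatSet seats4 (t + 1) l
              (cnt + (rt - l) + (bt - t) + (rt - l) + (bt - (t + 1))))
            (fuel - (rt - l).toNat - 1 - (bt - t).toNat - 1 - (rt - l).toNat - 1
              - (bt - (t + 1)).toNat - 1 - 1)
            (by omega) (by omega) (by omega) (by omega) (by omega) (by omega) (by omega)
            (by omega) (by omega) (by linarith [hprodkey, hprod]) (by omega) hOK5 (by omega)
          rw [show fuel = fuel - (rt - l).toNat - 1 - (bt - t).toNat - 1
                - (rt - l).toNat - 1 - (bt - (t + 1)).toNat - 1 - 1 + 1 + 1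
                + (bt - (t + 1)).toNat + 1 + (rt - l).toNat + 1 + (bt - t).toNat + 1
                + (rt - l).toNat from by omega,
            heq1 _, hturn1 _, heq2 _, hturn2 _, heq3 _, hturn3 _, heq4 _, hturn4 _, hstep5 _,
            hrec, solRing_step htlt hllt (by omega) (by omega) (by omega) (by omega)]

theorem solution_spec : Claim_equal_solution := by
  intro c r k _ hpre
  show solution c r k = solution_alt c r k
  rw [solution, solution_alt]
  by_cases h1 : c * r < k
  · rw [if_pos h1, if_pos h1]
  · rw [if_neg h1, if_neg h1]
    by_cases h2 : k < 2
    · rw [if_pos h2, show 2 * k.toNat + 8 = (2 * k.toNat + 7) + 1 from by omega,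
        loopA_stop _ (by omega)]
      norm_num
    · rw [if_neg h2]
      obtain ⟨hc, hr⟩ := hpre (by omega) (by omega)
      have hcr : (c - 1 - 0 + 1) * (r - 1 - 0 + 1) = c * r := by ring
      exact master (c - 1 - 0).toNat c r k 0 (c - 1) 0 (r - 1) (k - 1) 1
        (List.replicate c.toNat (List.replicate r.toNat 0)) (2 * k.toNat + 8) le_rfl
        (by omega) (by omega) (by omega) (by omega) (by omega) (by omega) (by omega)
        (by omega) (by linarith [hcr]) (by omega)
        (seatOK_congr (seatOK_init c r)
          (by intro a b ha hac hb hbr; exact ⟨fun hF => hF.elim, fun hQ => by omega⟩))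
        (by omega)
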